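-- pv_equiv track=rewrite | github.com/djuretic/praktika-vortaro-dicts | eo_dicts/utils.py | add_hats
-- ===== SOURCE A (Python) =====
-- MAPPING = {
--     "C": "Ĉ",
--     "G": "Ĝ",
--     "H": "Ĥ",
--     "J": "Ĵ",
--     "S": "Ŝ",
--     "U": "Ŭ",
--     "c": "ĉ",
--     "g": "ĝ",
--     "h": "ĥ",
--     "j": "ĵ",
--     "s": "ŝ",
--     "u": "ŭ",
-- }
--
-- def add_hats(word: str) -> str:
--     if not word or len(word) == 1:
--         return word
--     res = ""
--     pos = 0
--     while pos < len(word) - 1: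
--         char = word[pos]
--         if char in MAPPING.keys() and word[pos + 1] in ("x", "X"):
--             res += MAPPING[char]
--             pos += 2
--         else:
--             res += char
--             pos += 1
--     if pos == len(word) - 1:
--         res += word[-1]
--     return res
-- ===== SOURCE B (Python) =====
-- import re
--
-- MAPPING = {
--     "C": "Ĉ",
--     "G": "Ĝ",
--     "H": "Ĥ",
--     "J": "Ĵ",
--     "S": "Ŝ",
--     "U": "Ŭ",
--     "c": "ĉ",
--     "g": "ĝ",
--     "h": "ĥ",
--     "j": "ĵ",
--     "s": "ŝ",
--     "u": "ŭ",
-- }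
--
-- _X_PAT = re.compile(r"[CGHJSUcghjsu][xX]")
--
-- def add_hats(word: str) -> str:
--     return _X_PAT.sub(lambda m: MAPPING[m.group(0)[0]], word)
-- ===== Notes on version B (the rewrite author's own statement) =====
-- stated objective: faster
-- what changed: Replaces the manual pos-index while loop (with quadratic res += concatenation and trailing-character fixup) by a single compiled regex substitution [CGHJSUcghjsu][xX] with a callback, delegating left-to-right non-overlapping matching to the regex engine.
import Mathlib
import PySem

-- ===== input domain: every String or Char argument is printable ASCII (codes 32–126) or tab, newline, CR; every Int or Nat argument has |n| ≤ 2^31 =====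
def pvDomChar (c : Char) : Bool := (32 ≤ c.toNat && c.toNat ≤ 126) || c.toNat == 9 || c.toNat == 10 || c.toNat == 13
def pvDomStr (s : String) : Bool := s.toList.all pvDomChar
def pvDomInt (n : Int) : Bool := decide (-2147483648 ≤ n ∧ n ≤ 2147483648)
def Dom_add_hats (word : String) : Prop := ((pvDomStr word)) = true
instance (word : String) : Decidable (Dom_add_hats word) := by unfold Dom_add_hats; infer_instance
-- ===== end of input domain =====

-- B replaces A's manual pos-index while-loop (with trailing-char fixup) by a single regex
-- substitution with a callback (idiomatic); return values agree on every input.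

-- module constant MAPPING (each key and value is a single character)
def MAPPING : PySem.Dict Char Char :=
  PySem.Dict.mk [('C', 'Ĉ'), ('G', 'Ĝ'), ('H', 'Ĥ'), ('J', 'Ĵ'), ('S', 'Ŝ'), ('U', 'Ŭ'),
   ('c', 'ĉ'), ('g', 'ĝ'), ('h', 'ĥ'), ('j', 'ĵ'), ('s', 'ŝ'), ('u', 'ŭ')]

-- ===== PORT A =====
-- the while loop: pos-indexed scan over the characters, with the final `if pos == len-1` fixup
def addHatsLoop (cs : List Char) (pos : Nat) (res : List Char) : List Char :=
  if pos < cs.length - 1 then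
    let char := cs.getD pos ' '
    if PySem.Dict.contains MAPPING char = true ∧
        (cs.getD (pos + 1) ' ' = 'x' ∨ cs.getD (pos + 1) ' ' = 'X') then
      addHatsLoop cs (pos + 2) (res ++ [PySem.Dict.getD MAPPING char ' '])
    else
      addHatsLoop cs (pos + 1) (res ++ [char])
  else
    if pos = cs.length - 1 then res ++ [cs.getD (cs.length - 1) ' '] else res
termination_by cs.length - pos

def add_hats (word : String) : String :=
  let cs := word.toList
  if cs.length = 0 ∨ cs.length = 1 then word
  else String.ofList (addHatsLoop cs 0 [])

-- ===== PORT B =====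
-- Hand port of re.sub with the fixed pattern [CGHJSUcghjsu][xX] and callback
-- MAPPING[m.group(0)[0]]: left-to-right, non-overlapping two-character matches.
-- Exact for this pattern: a match starts at the leftmost position whose char is in
-- the class and whose successor is x/X; after a match the scan resumes past it.
def xSub : List Char → List Char
  | [] => []
  | c :: rest =>
    match rest with
    | [] => [c]
    | x :: rest' =>
      if c ∈ ['C', 'G', 'H', 'J', 'S', 'U', 'c', 'g', 'h', 'j', 's', 'u'] ∧ (x = 'x' ∨ x = 'X') then
        PySem.Dict.getD MAPPING c c :: xSub rest'
      else
        c :: xSub (x :: rest')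

def add_hats_alt (word : String) : String := String.ofList (xSub word.toList)

-- ===== PRECONDITION & SPEC =====
def Spec_add_hats (word : String) (out : String) : Prop := out = add_hats_alt word
instance (word : String) (out : String) : Decidable (Spec_add_hats word out) := by unfold Spec_add_hats; infer_instance

-- ===== CLAIM (what is proved, stated in full; the proofs are below) =====
def Claim_equal_add_hats : Prop := ∀ (word : String), Dom_add_hats word → Spec_add_hats word (add_hats word)

-- ===== LEMMAS AND PROOFS =====

-- membership in MAPPING's keys coincides with the regex character class
lemma mapping_mem_iff (c : Char) :
    PySem.Dict.contains MAPPING c = true ↔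
      c ∈ ['C', 'G', 'H', 'J', 'S', 'U', 'c', 'g', 'h', 'j', 's', 'u'] := by
  simp only [MAPPING, PySem.Dict.contains_mk, List.any_cons, List.any_nil,
    Bool.or_eq_true, beq_iff_eq, or_false, List.mem_cons, List.not_mem_nil,
    Bool.false_eq_true]
  constructor <;> rintro (h | h | h | h | h | h | h | h | h | h | h | h) <;> subst h <;> simp

-- with the key present, the default of a getD is irrelevant
lemma getD_eq_of_contains (d : PySem.Dict Char Char) (k a b : Char)
    (h : d.contains k = true) : d.getD k a = d.getD k b := by
  have hs : (d.get? k).isSome := by rw [← PySem.Dict.contains_eq_isSome_get?, h]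
  obtain ⟨v, hv⟩ := Option.isSome_iff_exists.mp hs
  rw [PySem.Dict.getD_eq_get?_getD, PySem.Dict.getD_eq_get?_getD, hv]
  rfl

lemma loop_eq_xSub (cs : List Char) (pos : Nat) (res : List Char) (hne : cs ≠ []) :
    addHatsLoop cs pos res = res ++ xSub (cs.drop pos) := by
  fun_induction addHatsLoop cs pos res with
  | case1 pos res hlt char hcond ih =>
    have hpos : pos < cs.length := by omega
    have hpos1 : pos + 1 < cs.length := by omega
    have e1 : char = cs[pos] := by
      simp [char, List.getD_eq_getElem?_getD, List.getElem?_eq_getElem hpos]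
    have e2 : cs.getD (pos + 1) ' ' = cs[pos + 1] := by
      simp [List.getD_eq_getElem?_getD, List.getElem?_eq_getElem hpos1]
    rw [ih, List.drop_eq_getElem_cons hpos, List.drop_eq_getElem_cons hpos1]
    simp only [xSub]
    rw [if_pos ⟨(mapping_mem_iff _).mp (e1 ▸ hcond.1), by
      rcases hcond.2 with h | h
      · exact Or.inl (e2 ▸ h)
      · exact Or.inr (e2 ▸ h)⟩]
    rw [e1, getD_eq_of_contains MAPPING cs[pos] ' ' cs[pos] (e1 ▸ hcond.1)]
    simp
  | case2 pos res hlt char hcond ih =>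
    have hpos : pos < cs.length := by omega
    have hpos1 : pos + 1 < cs.length := by omega
    have e1 : char = cs[pos] := by
      simp [char, List.getD_eq_getElem?_getD, List.getElem?_eq_getElem hpos]
    have e2 : cs.getD (pos + 1) ' ' = cs[pos + 1] := by
      simp [List.getD_eq_getElem?_getD, List.getElem?_eq_getElem hpos1]
    rw [ih, List.drop_eq_getElem_cons hpos, List.drop_eq_getElem_cons hpos1]
    simp only [xSub]
    rw [if_neg, e1]
    · simp
    · intro hc
      refine hcond ⟨e1 ▸ (mapping_mem_iff _).mpr hc.1, ?_⟩
      rcases hc.2 with h | h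
      · exact Or.inl (e2 ▸ h)
      · exact Or.inr (e2 ▸ h)
  | case3 res hlt =>
    have hlen : 0 < cs.length := List.length_pos_of_ne_nil hne
    have hpos : cs.length - 1 < cs.length := by omega
    have e1 : cs.getD (cs.length - 1) ' ' = cs[cs.length - 1] := by
      simp [List.getD_eq_getElem?_getD, List.getElem?_eq_getElem hpos]
    rw [List.drop_eq_getElem_cons hpos, show cs.length - 1 + 1 = cs.length by omega,
      List.drop_length, e1]
    simp [xSub]
  | case4 pos res hlt hne2 =>
    have hlen : 0 < cs.length := List.length_pos_of_ne_nil hne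
    rw [List.drop_eq_nil_of_le (by omega : cs.length ≤ pos)]
    simp [xSub]

theorem add_hats_spec_aux (word : String) : add_hats word = add_hats_alt word := by
  unfold add_hats add_hats_alt
  by_cases h : word.toList.length = 0 ∨ word.toList.length = 1
  · rw [if_pos h]
    rcases h with h | h
    · rw [List.length_eq_zero_iff.mp h, show xSub [] = [] from rfl]
      conv_lhs => rw [← String.ofList_toList (s := word), List.length_eq_zero_iff.mp h]
    · obtain ⟨c, hc⟩ := List.length_eq_one_iff.mp h
      rw [hc, show xSub [c] = [c] from rfl, ← hc, String.ofList_toList]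
  · rw [if_neg h]
    have hne : word.toList ≠ [] := by
      intro h0; exact h (Or.inl (by simp [h0]))
    rw [loop_eq_xSub _ 0 [] hne]
    simp

-- ===== VERDICT (by name: the statement is the Claim_ definition above) =====
theorem add_hats_spec : Claim_equal_add_hats := by
  intro word _
  exact add_hats_spec_aux word
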